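-- pv_equiv track=rewrite | github.com/Preethi-K-N/Hand_Gesture_Scientific_Calculator | scientific_calculator/scientific_hand_gesture_calculator.py | detect_button_click
-- ===== SOURCE A (Python) =====
-- buttons = [
--     ['C', 'CE', 'sqrt(', '+', 'pi', 'cos(', 'tan(', 'sin('],
--     ['1', '2', '3', '-', '2pi', 'cosh(', 'tanh(', 'sinh('],
--     ['4', '5', '6', '*', 'ln(', 'asin(', 'acos(', 'atan('],
--     ['7', '8', '9', '/', 'log10(', '(', ')', 'fact('],
--     ['0', '.', '%', '=', 'CLR', 'x^y', 'x^2', 'x^3'],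
--     ['M+', 'M-', 'MR', 'MC', 'DEG/RAD', '', '', ''] # New row for memory and angle mode
-- ]
--
-- button_w = 100  # Width of each button
--
-- button_h = 60   # Height of each button
--
-- padding_x = 10  # Horizontal spacing between buttons
--
-- padding_y = 10  # Vertical spacing between button rows
--
-- display_h = 120 # Height of the expression display area
--
-- def detect_button_click(x, y):
--     """
--     Detects which button, if any, was clicked based on the given coordinates.
--     """
--     start_y = display_h + 30 # Same starting Y as in draw_buttons
--     for i, row in enumerate(buttons):
--         for j, label in enumerate(row):
--             bx = j * (button_w + padding_x) + 10
--             by = i * (button_h + padding_y) + start_y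
--             # Check if coordinates fall within a button's bounds
--             if bx < x < bx + button_w and by < y < by + button_h:
--                 return label
--     return None
-- ===== SOURCE B (Python) =====
-- buttons = [
--     ['C', 'CE', 'sqrt(', '+', 'pi', 'cos(', 'tan(', 'sin('],
--     ['1', '2', '3', '-', '2pi', 'cosh(', 'tanh(', 'sinh('],
--     ['4', '5', '6', '*', 'ln(', 'asin(', 'acos(', 'atan('],
--     ['7', '8', '9', '/', 'log10(', '(', ')', 'fact('],
--     ['0', '.', '%', '=', 'CLR', 'x^y', 'x^2', 'x^3'],
--     ['M+', 'M-', 'MR', 'MC', 'DEG/RAD', '', '', '']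
-- ]
--
-- def detect_button_click(x, y):
--     # O(1): compute the candidate grid cell directly, then confirm the hit.
--     j = (x - 10) // 110
--     i = (y - 150) // 70
--     if 0 <= i < 6 and 0 <= j < 8:
--         bx = 10 + j * 110
--         by = 150 + i * 70
--         if bx < x < bx + 100 and by < y < by + 60:
--             return buttons[i][j]
--     return None
-- ===== Notes on version B (the rewrite author's own statement) =====
-- stated objective: faster
-- what changed: Replaces A's nested scan over all 48 grid cells with O(1) arithmetic: compute the candidate row/column by floor division, then confirm the point lies strictly inside that one cell.
import Mathlib
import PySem

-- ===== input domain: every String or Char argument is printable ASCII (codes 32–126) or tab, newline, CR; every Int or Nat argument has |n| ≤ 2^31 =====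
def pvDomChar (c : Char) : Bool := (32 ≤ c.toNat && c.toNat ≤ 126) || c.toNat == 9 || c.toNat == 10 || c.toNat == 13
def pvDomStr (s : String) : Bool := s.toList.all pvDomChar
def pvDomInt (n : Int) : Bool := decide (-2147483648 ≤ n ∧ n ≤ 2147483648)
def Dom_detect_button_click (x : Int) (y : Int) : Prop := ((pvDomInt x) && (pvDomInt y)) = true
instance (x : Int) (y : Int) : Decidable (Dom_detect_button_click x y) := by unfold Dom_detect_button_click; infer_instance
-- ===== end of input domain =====

-- B replaces A's linear scan over all 48 buttons by direct grid-index arithmetic (compute the candidate cell, then confirm the hit).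

-- ===== PORT A =====
def pvButtons : List (List String) :=
  [ ["C", "CE", "sqrt(", "+", "pi", "cos(", "tan(", "sin("],
    ["1", "2", "3", "-", "2pi", "cosh(", "tanh(", "sinh("],
    ["4", "5", "6", "*", "ln(", "asin(", "acos(", "atan("],
    ["7", "8", "9", "/", "log10(", "(", ")", "fact("],
    ["0", ".", "%", "=", "CLR", "x^y", "x^2", "x^3"],
    ["M+", "M-", "MR", "MC", "DEG/RAD", "", "", ""] ]
def pvButtonW : Int := 100
def pvButtonH : Int := 60
def pvPaddingX : Int := 10
def pvPaddingY : Int := 10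
def pvDisplayH : Int := 120
def pvScanRow (x y : Int) (i : Int) (j : Int) : List String → Option String
  | [] => none
  | label :: rest =>
    let bx := j * (pvButtonW + pvPaddingX) + 10
    let by_ := i * (pvButtonH + pvPaddingY) + (pvDisplayH + 30)
    if bx < x ∧ x < bx + pvButtonW ∧ by_ < y ∧ y < by_ + pvButtonH then some label
    else pvScanRow x y i (j + 1) rest
def pvScanRows (x y : Int) (i : Int) : List (List String) → Option String
  | [] => none
  | row :: rest =>
    match pvScanRow x y i 0 row with
    | some l => some l
    | none => pvScanRows x y (i + 1) rest
def detect_button_click (x : Int) (y : Int) : Option String :=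
  pvScanRows x y 0 pvButtons
-- ===== PORT B =====
def detect_button_click_alt (x : Int) (y : Int) : Option String :=
  let j := PySem.Int.floordiv (x - 10) 110
  let i := PySem.Int.floordiv (y - 150) 70
  if 0 ≤ i ∧ i < 6 ∧ 0 ≤ j ∧ j < 8 then
    let bx := 10 + j * 110
    let by_ := 150 + i * 70
    if bx < x ∧ x < bx + 100 ∧ by_ < y ∧ y < by_ + 60 then
      (PySem.List.pyGet? pvButtons i).bind (fun row => PySem.List.pyGet? row j)
    else none
  else none


-- ===== PRECONDITION & SPEC =====
def Spec_detect_button_click (x : Int) (y : Int) (out : Option String) : Prop := out = detect_button_click_alt x y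
instance (x : Int) (y : Int) (out : Option String) : Decidable (Spec_detect_button_click x y out) := by unfold Spec_detect_button_click; infer_instance

-- ===== CLAIM (what is proved, stated in full; the proofs are below) =====
def Claim_equal_detect_button_click : Prop := ∀ (x : Int) (y : Int), Dom_detect_button_click x y → Spec_detect_button_click x y (detect_button_click x y)

-- ===== LEMMAS AND PROOFS =====
-- A row whose vertical strip does not strictly contain y never hits.
theorem pvScanRow_none (x y i : Int)
    (hy : ¬ (150 + i * 70 < y ∧ y < 150 + i * 70 + 60)) :
    ∀ (row : List String) (j : Int), pvScanRow x y i j row = none := by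
  intro row
  induction row with
  | nil => intro j; rfl
  | cons label rest ih =>
    intro j
    simp only [pvScanRow, pvButtonW, pvButtonH, pvPaddingX, pvPaddingY, pvDisplayH]
    rw [if_neg (by omega)]
    exact ih (j + 1)

-- Rows strictly below the candidate row never hit.
theorem pvScanRows_none (x y : Int) :
    ∀ (rows : List (List String)) (i : Int), (y - 150) / 70 < i →
      pvScanRows x y i rows = none := by
  intro rows
  induction rows with
  | nil => intro i _; rfl
  | cons row rest ih =>
    intro i hi
    simp only [pvScanRows]
    rw [pvScanRow_none x y i (by omega) row 0]
    exact ih (i + 1) (by omega)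

-- Characterization of the inner scan when y lies strictly inside row i's strip.
theorem pvScanRow_eq (x y i : Int)
    (hy : 150 + i * 70 < y ∧ y < 150 + i * 70 + 60) :
    ∀ (row : List String) (j : Int),
      pvScanRow x y i j row =
        (if j ≤ (x - 10) / 110 ∧ (x - 10) / 110 < j + row.length ∧
            10 + ((x - 10) / 110) * 110 < x ∧ x < 10 + ((x - 10) / 110) * 110 + 100
         then some (row.getD ((x - 10) / 110 - j).toNat "")
         else none) := by
  intro row
  induction row with
  | nil => intro j; simp [pvScanRow]; omega
  | cons label rest ih =>
    intro j
    simp only [pvScanRow, pvButtonW, pvButtonH, pvPaddingX, pvPaddingY, pvDisplayH]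
    by_cases hx : j * (100 + 10) + 10 < x ∧ x < j * (100 + 10) + 10 + 100
    · rw [if_pos (by omega)]
      have hjx : (x - 10) / 110 = j := by omega
      rw [if_pos (by simp [hjx]; omega)]
      simp [hjx]
    · rw [if_neg (by omega), ih (j + 1)]
      by_cases hc : j + 1 ≤ (x - 10) / 110 ∧ (x - 10) / 110 < j + 1 + rest.length ∧
          10 + ((x - 10) / 110) * 110 < x ∧ x < 10 + ((x - 10) / 110) * 110 + 100
      · rw [if_pos hc, if_pos (by simp at hc ⊢; omega)]
        have h1 : ((x - 10) / 110 - j).toNat = ((x - 10) / 110 - (j + 1)).toNat + 1 := by omega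
        simp [h1]
      · rw [if_neg hc, if_neg (by simp at hc ⊢; omega)]

-- Characterization of the outer scan.
theorem pvScanRows_eq (x y : Int) :
    ∀ (rows : List (List String)) (i : Int),
      pvScanRows x y i rows =
        (if i ≤ (y - 150) / 70 ∧ (y - 150) / 70 < i + rows.length ∧
            150 + ((y - 150) / 70) * 70 < y ∧ y < 150 + ((y - 150) / 70) * 70 + 60
         then pvScanRow x y ((y - 150) / 70) 0 (rows.getD ((y - 150) / 70 - i).toNat [])
         else none) := by
  intro rows
  induction rows with
  | nil => intro i; simp [pvScanRows]; omega
  | cons row rest ih =>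
    intro i
    simp only [pvScanRows]
    by_cases hy : 150 + i * 70 < y ∧ y < 150 + i * 70 + 60
    · have hiy : (y - 150) / 70 = i := by omega
      rw [if_pos (by simp [hiy]; omega)]
      simp only [hiy, Int.sub_self, Int.toNat_zero, List.getD_cons_zero]
      cases h : pvScanRow x y i 0 row with
      | some l => rfl
      | none => rw [pvScanRows_none x y rest (i + 1) (by omega)]
    · rw [pvScanRow_none x y i hy row 0]
      rw [ih (i + 1)]
      by_cases hc : i + 1 ≤ (y - 150) / 70 ∧ (y - 150) / 70 < i + 1 + rest.length ∧
          150 + ((y - 150) / 70) * 70 < y ∧ y < 150 + ((y - 150) / 70) * 70 + 60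
      · rw [if_pos hc, if_pos (by simp at hc ⊢; omega)]
        have h1 : ((y - 150) / 70 - i).toNat = ((y - 150) / 70 - (i + 1)).toNat + 1 := by omega
        simp [h1]
      · rw [if_neg hc, if_neg (by simp at hc ⊢; omega)]

set_option maxHeartbeats 1000000 in
theorem detect_button_click_eq (x y : Int) :
    detect_button_click x y = detect_button_click_alt x y := by
  unfold detect_button_click detect_button_click_alt
  rw [PySem.Int.floordiv_eq_ediv_of_pos (by norm_num),
      PySem.Int.floordiv_eq_ediv_of_pos (by norm_num)]
  rw [pvScanRows_eq x y pvButtons 0]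
  set jx := (x - 10) / 110 with hjx
  set iy := (y - 150) / 70 with hiy
  clear_value jx iy
  dsimp only
  by_cases hy : 0 ≤ iy ∧ iy < 6 ∧ 150 + iy * 70 < y ∧ y < 150 + iy * 70 + 60
  · rw [if_pos (by simp [pvButtons]; omega)]
    rw [pvScanRow_eq x y iy (by omega) _ 0, ← hjx]
    have hlen : (((pvButtons.getD (iy - 0).toNat []).length : Nat) : Int) = 8 := by
      obtain ⟨h0, h6, _⟩ := hy
      interval_cases iy <;> rfl
    by_cases hx : 0 ≤ jx ∧ jx < 8 ∧ 10 + jx * 110 < x ∧ x < 10 + jx * 110 + 100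
    · rw [if_pos (by rw [hlen]; omega)]
      rw [if_pos (by omega), if_pos (by omega)]
      obtain ⟨hi0, hi6, _⟩ := hy
      obtain ⟨hj0, hj8, _⟩ := hx
      interval_cases iy <;> interval_cases jx <;> rfl
    · rw [if_neg (by rw [hlen]; omega)]
      by_cases h8 : 0 ≤ jx ∧ jx < 8
      · rw [if_pos (by omega), if_neg (by omega)]
      · rw [if_neg (by omega)]
  · rw [if_neg (by simp [pvButtons]; omega)]
    by_cases hco : 0 ≤ iy ∧ iy < 6 ∧ 0 ≤ jx ∧ jx < 8
    · rw [if_pos hco, if_neg (by omega)]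
    · rw [if_neg hco]

-- ===== VERDICT (by name: the statement is the Claim_ definition above) =====
theorem detect_button_click_spec : Claim_equal_detect_button_click := by
  intro x y _
  exact detect_button_click_eq x y
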